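-- pv_equiv track=rewrite | github.com/PowerLichen/CodeTest | Programmers-py/138476.py | solution
-- ===== SOURCE A (Python) =====
-- from collections import defaultdict
--
-- def solution(k, tangerine):
--     answer = 0
--     group_t = defaultdict(int)
--     for t in tangerine:
--         group_t[t] += 1
--
--     counts = sorted(group_t.values(), reverse=True)
--
--     for n in counts:
--         answer += 1
--         k -= n
--         if k <= 0:
--             break
--
--     return answer
-- ===== SOURCE B (Python) =====
-- def solution(k, tangerine):
--     freq = {}
--     for t in tangerine:
--         freq[t] = freq.get(t, 0) + 1
--     n = len(tangerine)
--     cnt = [0] * (n + 1)          # cnt[s] = number of tangerine sizes appearing exactly s times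
--     for v in freq.values():
--         cnt[v] += 1
--     answer = 0
--     for s in range(n, 0, -1):    # bucket scan from the largest group size down
--         for _ in range(cnt[s]):
--             answer += 1
--             k -= s
--             if k <= 0:
--                 return answer
--     return answer
-- ===== Notes on version B (the rewrite author's own statement) =====
-- stated objective: alternative
-- what changed: Replaces A's comparison sort of the group sizes (sorted(values, reverse=True)) by a counting-sort-style bucket array cnt[s] = number of sizes occurring s times, scanned from the largest size down.
import Mathlib
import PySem

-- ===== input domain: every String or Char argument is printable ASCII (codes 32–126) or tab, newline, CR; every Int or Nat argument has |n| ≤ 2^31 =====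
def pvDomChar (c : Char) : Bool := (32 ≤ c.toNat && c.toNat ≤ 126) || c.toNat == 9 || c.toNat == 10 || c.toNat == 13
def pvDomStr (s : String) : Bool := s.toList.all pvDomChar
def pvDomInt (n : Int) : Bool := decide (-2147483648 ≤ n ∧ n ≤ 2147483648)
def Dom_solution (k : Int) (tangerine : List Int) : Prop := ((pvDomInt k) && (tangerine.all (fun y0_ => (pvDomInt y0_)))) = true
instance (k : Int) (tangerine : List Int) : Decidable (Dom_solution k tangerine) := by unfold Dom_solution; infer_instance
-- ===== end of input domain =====

-- B replaces A's comparison sort of the group sizes by a counting-sort-style bucket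
-- array scanned from the largest group size down (objective: alternative algorithm).

-- ===== PORT A =====
-- for n in counts: answer += 1; k -= n; if k <= 0: break
def aLoop : List Int → Int → Int → Int
  | [], answer, _ => answer
  | n :: rest, answer, k =>
    if k - n ≤ 0 then answer + 1 else aLoop rest (answer + 1) (k - n)

def solution (k : Int) (tangerine : List Int) : Int :=
  let group_t := tangerine.foldl (fun d t => d.modify t 0 (· + 1)) PySem.Dict.empty
  let counts := PySem.List.sorted group_t.values (fun x => x) true
  aLoop counts 0 k

-- ===== PORT B =====
-- for _ in range(c): answer += 1; k -= s; if k <= 0: return answer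
-- (inl = inner loop ran out: carry answer and k on; inr = early return with the answer)
def bInner (s : Int) : Nat → Int → Int → (Int × Int) ⊕ Int
  | 0, answer, k => Sum.inl (answer, k)
  | c + 1, answer, k =>
    if k - s ≤ 0 then Sum.inr (answer + 1) else bInner s c (answer + 1) (k - s)

-- for s in range(n, 0, -1): …
def bOuter (cnt : List Int) : List Int → Int → Int → Int
  | [], answer, _ => answer
  | s :: rest, answer, k =>
    match bInner s (PySem.List.pyGetD cnt s 0).toNat answer k with
    | Sum.inr answer => answer
    | Sum.inl (answer, k) => bOuter cnt rest answer k

def solution_alt (k : Int) (tangerine : List Int) : Int :=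
  let freq := tangerine.foldl (fun d t => d.insert t (d.getD t 0 + 1)) PySem.Dict.empty
  let n := tangerine.length
  let cnt := freq.values.foldl
    (fun c v => PySem.List.pySetD c v (PySem.List.pyGetD c v 0 + 1)) (List.replicate (n + 1) 0)
  bOuter cnt (PySem.List.pyRange (n : Int) 0 (-1)) 0 k

-- ===== PRECONDITION & SPEC =====
def Spec_solution (k : Int) (tangerine : List Int) (out : Int) : Prop := out = solution_alt k tangerine
instance (k : Int) (tangerine : List Int) (out : Int) : Decidable (Spec_solution k tangerine out) := by unfold Spec_solution; infer_instance

-- ===== CLAIM (what is proved, stated in full; the proofs are below) =====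
def Claim_equal_solution : Prop := ∀ (k : Int) (tangerine : List Int), Dom_solution k tangerine → Spec_solution k tangerine (solution k tangerine)

-- ===== LEMMAS AND PROOFS =====

-- B's inner loop over one bucket is A's loop over that many copies of the size s
theorem bInner_aLoop (s : Int) (c : Nat) (rest : List Int) :
    ∀ ans k, aLoop (List.replicate c s ++ rest) ans k =
      match bInner s c ans k with
      | Sum.inr a => a
      | Sum.inl (a, k') => aLoop rest a k' := by
  induction c with
  | zero => intro ans k; simp [bInner]
  | succ c ih =>
    intro ans k
    rw [List.replicate_succ, List.cons_append]
    simp only [aLoop, bInner]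
    split
    · rfl
    · exact ih _ _

-- B's bucket scan is A's loop over the concatenation of the buckets
theorem bOuter_aLoop (cnt : List Int) (ss : List Int) :
    ∀ ans k, bOuter cnt ss ans k =
      aLoop (ss.flatMap (fun s => List.replicate (PySem.List.pyGetD cnt s 0).toNat s)) ans k := by
  induction ss with
  | nil => intro ans k; simp [bOuter, aLoop]
  | cons s rest ih =>
    intro ans k
    rw [List.flatMap_cons, bInner_aLoop]
    simp only [bOuter]
    cases h : bInner s (PySem.List.pyGetD cnt s 0).toNat ans k with
    | inr a => rfl
    | inl p => exact ih p.1 p.2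

-- the bucket array counts occurrences: cnt[s] = initial cnt[s] + (number of v = s)
theorem getD_buildCnt (vs : List Int) :
    ∀ (c : List Int), (∀ v ∈ vs, 0 ≤ v ∧ v < (c.length : Int)) →
      ∀ s : Int, 0 ≤ s → s < (c.length : Int) →
      PySem.List.pyGetD (vs.foldl (fun c v => PySem.List.pySetD c v (PySem.List.pyGetD c v 0 + 1)) c) s 0
        = PySem.List.pyGetD c s 0 + (vs.count s : Int) := by
  induction vs with
  | nil => intro c _ s _ _; simp
  | cons v vs ih =>
    intro c hb s hs0 hslt
    obtain ⟨hv0, hvlt⟩ := hb v (List.mem_cons_self ..)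
    have hvn : v = ((v.toNat : Nat) : Int) := (Int.toNat_of_nonneg hv0).symm
    have hlen : v.toNat < c.length := by omega
    rw [List.foldl_cons]
    rw [ih (PySem.List.pySetD c v (PySem.List.pyGetD c v 0 + 1))
        (by intro w hw; rw [PySem.List.length_pySetD]; exact hb w (List.mem_cons_of_mem _ hw))
        s hs0 (by rw [PySem.List.length_pySetD]; exact hslt)]
    have hsn : s = ((s.toNat : Nat) : Int) := (Int.toNat_of_nonneg hs0).symm
    rw [hvn, hsn, PySem.List.pyGetD_pySetD_natCast c v.toNat s.toNat _ 0 hlen]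
    rw [List.count_cons]
    by_cases h : s.toNat = v.toNat
    · rw [if_pos h, if_pos (beq_iff_eq.mpr (by omega))]
      rw [h]; push_cast; ring
    · rw [if_neg h, if_neg (by simp; omega)]
      push_cast; ring

theorem count_flatMap_replicate (vs : List Int) (a : Int) :
    ∀ ss : List Int, ss.Nodup →
      (ss.flatMap (fun s => List.replicate (vs.count s) s)).count a
        = if a ∈ ss then vs.count a else 0 := by
  intro ss hnd
  induction ss with
  | nil => simp
  | cons s rest ih =>
    rw [List.flatMap_cons, List.count_append, List.count_replicate,
        ih (List.nodup_cons.mp hnd).2]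
    rcases List.nodup_cons.mp hnd with ⟨hs, _⟩
    by_cases h : a = s
    · subst h; simp [hs]
    · have hba : (s == a) = false := beq_eq_false_iff_ne.mpr (fun h' => h h'.symm)
      simp [hba, h]

-- the concatenation of the buckets is a rearrangement of the group sizes
theorem perm_flatMap_replicate (ss vs : List Int) (hnd : ss.Nodup)
    (hsub : ∀ v ∈ vs, v ∈ ss) :
    (ss.flatMap (fun s => List.replicate (vs.count s) s)).Perm vs := by
  rw [List.perm_iff_count]
  intro a
  rw [count_flatMap_replicate vs a ss hnd]
  split
  · rfl
  · exact (List.count_eq_zero.mpr (fun h => ‹¬ a ∈ ss› (hsub a h))).symm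

-- scanning buckets from the largest size down yields a descending list
theorem pairwise_flatMap_replicate (vs : List Int) :
    ∀ ss : List Int, ss.Pairwise (fun a b => b < a) →
      (ss.flatMap (fun s => List.replicate (vs.count s) s)).Pairwise (fun a b : Int => b ≤ a) := by
  intro ss hp
  induction ss with
  | nil => simp
  | cons s rest ih =>
    rw [List.flatMap_cons, List.pairwise_append]
    rcases List.pairwise_cons.mp hp with ⟨hlt, hrest⟩
    refine ⟨List.pairwise_replicate.mpr (Or.inr le_rfl), ih hrest, ?_⟩
    intro x hx y hy
    rcases List.eq_of_mem_replicate hx with rfl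
    rcases List.mem_flatMap.mp hy with ⟨t, ht, hyt⟩
    rcases List.eq_of_mem_replicate hyt with rfl
    exact le_of_lt (hlt _ ht)

theorem range_nodup_pairwise (n : Int) :
    (PySem.List.pyRange n 0 (-1)).Nodup ∧
    (PySem.List.pyRange n 0 (-1)).Pairwise (fun a b => b < a) := by
  rw [PySem.List.pyRange_neg_one_eq_reverse]
  exact ⟨List.nodup_reverse.mpr (PySem.List.nodup_pyRange_one _ _),
    List.pairwise_reverse.mpr (PySem.List.pairwise_lt_pyRange_one _ _)⟩

-- ===== VERDICT (by name: the statement is the Claim_ definition above) =====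
theorem solution_spec : Claim_equal_solution := by
  intro k tangerine _
  show solution k tangerine = solution_alt k tangerine
  unfold solution solution_alt
  rw [← PySem.Dict.counter_eq_foldl, PySem.Dict.foldl_insert_getD_add_one_eq_counter]
  show aLoop (PySem.List.sorted (PySem.Dict.counter tangerine).values (fun x => x) true) 0 k
    = bOuter ((PySem.Dict.counter tangerine).values.foldl
        (fun c v => PySem.List.pySetD c v (PySem.List.pyGetD c v 0 + 1))
        (List.replicate (tangerine.length + 1) (0 : Int)))
        (PySem.List.pyRange (tangerine.length : Int) 0 (-1)) 0 k
  -- every group size is between 1 and len(tangerine)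
  have hv_mem : ∀ v ∈ (PySem.Dict.counter tangerine).values,
      1 ≤ v ∧ v ≤ (tangerine.length : Int) := by
    intro v hv
    have hmem : v ∈ (PySem.Dict.counter tangerine).items.map (·.2) := hv
    rw [PySem.Dict.items_counter] at hmem
    simp only [List.map_map, List.mem_map] at hmem
    obtain ⟨key, hkey, rfl⟩ := hmem
    have hkt : key ∈ tangerine := (PySem.Set.mem_ofList tangerine key).mp hkey
    refine ⟨?_, ?_⟩ <;> simp only [Function.comp_apply]
    · exact_mod_cast List.count_pos_iff.mpr hkt
    · exact_mod_cast List.count_le_length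
  obtain ⟨hrnd, hrpw⟩ := range_nodup_pairwise (tangerine.length : Int)
  -- the bucket array holds the multiplicities of the group sizes
  have hget : ∀ s ∈ PySem.List.pyRange (tangerine.length : Int) 0 (-1),
      PySem.List.pyGetD ((PySem.Dict.counter tangerine).values.foldl
        (fun c v => PySem.List.pySetD c v (PySem.List.pyGetD c v 0 + 1))
        (List.replicate (tangerine.length + 1) (0 : Int))) s 0
      = (((PySem.Dict.counter tangerine).values.count s : Nat) : Int) := by
    intro s hs
    obtain ⟨hs0, hsn⟩ := PySem.List.mem_pyRange_neg_one.mp hs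
    rw [getD_buildCnt _ _
      (by intro v hv; have := hv_mem v hv; simp only [List.length_replicate]; push_cast; omega)
      s (by omega) (by simp only [List.length_replicate]; push_cast; omega)]
    rw [PySem.List.pyGetD_of_nonneg _ _ (by omega)]
    simp [List.getD]
  rw [bOuter_aLoop]
  rw [List.flatMap_congr
    (g := fun s => List.replicate ((PySem.Dict.counter tangerine).values.count s) s)
    (fun s hs => by rw [hget s hs, Int.toNat_natCast])]
  -- the concatenated buckets are exactly sorted(values, reverse=True)
  have hsorted : PySem.List.sorted (PySem.Dict.counter tangerine).values (fun x => x) true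
      = (PySem.List.pyRange (tangerine.length : Int) 0 (-1)).flatMap
          (fun s => List.replicate ((PySem.Dict.counter tangerine).values.count s) s) := by
    refine List.Perm.eq_of_pairwise (fun a b _ _ h1 h2 => by omega)
      (PySem.List.sorted_pairwise_rev _ (fun x => x))
      (pairwise_flatMap_replicate _ _ hrpw)
      ((PySem.List.sorted_perm _ (fun x => x) true).trans
        (perm_flatMap_replicate _ _ hrnd (fun v hv => PySem.List.mem_pyRange_neg_one.mpr
          (by have := hv_mem v hv; omega))).symm)
  rw [hsorted]
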